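-- pv_equiv track=rewrite | github.com/Madung2/django-keyvalue | docTransformer/TsExpert/services/extract.py | update_table_data
-- ===== SOURCE A (Python) =====
-- def update_table_data(table_data, second_key_data):
--     # 각 second_key_data의 0번째 요소를 기준으로 table_data와 비교
--     for sec_row in second_key_data:
--         sec_key = sec_row[0]
--
--         # table_data에서 0번째 요소가 겹치는 항목을 찾고 교체
--         for idx, table_row in enumerate(table_data):
--             if table_row[0] == sec_key:
--                 table_data[idx] = sec_row  # 해당 row를 second_key_data의 row로 교체
--                 break
--
--     return table_data
-- ===== SOURCE B (Python) =====
-- def update_table_data(table_data, second_key_data):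
--     # Pre-index second_key_data (last row per key wins, as when A replaces the
--     # same slot repeatedly), then do ONE pass over table_data, replacing only
--     # the first occurrence of each key (tracked by `used`, matching A's break).
--     lookup = {row[0]: row for row in second_key_data}
--     used = set()
--     for idx, row in enumerate(table_data):
--         key = row[0]
--         if key in lookup and key not in used:
--             table_data[idx] = lookup[key]
--             used.add(key)
--     return table_data
-- ===== Notes on version B (the rewrite author's own statement) =====
-- stated objective: alternative
-- what changed: Instead of rescanning table_data once per second_key_data row (nested loops), B builds a last-wins dict index of second_key_data once and makes a single pass over table_data with a used-keys set so only the first occurrence per key is replaced.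
-- outside the precondition, e.g. on update_table_data([[]], []): A returns [[]], B raises IndexError
import Mathlib
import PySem

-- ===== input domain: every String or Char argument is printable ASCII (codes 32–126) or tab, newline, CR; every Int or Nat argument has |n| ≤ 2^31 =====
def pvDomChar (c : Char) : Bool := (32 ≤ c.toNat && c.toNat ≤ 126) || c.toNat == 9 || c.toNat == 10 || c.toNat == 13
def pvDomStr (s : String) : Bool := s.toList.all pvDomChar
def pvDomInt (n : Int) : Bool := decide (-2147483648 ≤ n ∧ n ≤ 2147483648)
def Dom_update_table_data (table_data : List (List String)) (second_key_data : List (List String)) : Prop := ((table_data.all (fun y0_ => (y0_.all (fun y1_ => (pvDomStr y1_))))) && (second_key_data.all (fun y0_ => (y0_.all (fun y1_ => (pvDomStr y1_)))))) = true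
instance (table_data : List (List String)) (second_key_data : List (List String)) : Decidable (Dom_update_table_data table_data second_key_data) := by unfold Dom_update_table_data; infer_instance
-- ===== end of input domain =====

-- B replaces A's nested rescan (one scan of table_data per second_key_data row) by a
-- last-wins dict index over second_key_data plus a single pass over table_data with a
-- used-keys set; equivalence is about the returned list contents (both Pythons also
-- mutate table_data in place to that same content).

-- ===== PORT A =====
-- row[0]; under Pre_ every row is nonempty so pyGet? is some (default "" is unreachable)
def pvHead0 (r : List String) : String := (PySem.List.pyGet? r 0).getD ""

-- inner 'for idx, table_row in enumerate(table_data): if match: replace; break'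
def pvReplaceFirst (key : String) (sec : List String) : List (List String) → List (List String)
  | [] => []
  | r :: rs => if pvHead0 r = key then sec :: rs else r :: pvReplaceFirst key sec rs

def update_table_data (table_data : List (List String)) (second_key_data : List (List String)) : List (List String) :=
  second_key_data.foldl (fun acc sec_row => pvReplaceFirst (pvHead0 sec_row) sec_row acc) table_data

-- ===== PORT B =====
-- lookup = {row[0]: row for row in second_key_data}
def pvBuildLookup (second_key_data : List (List String)) : PySem.Dict String (List String) :=
  second_key_data.foldl (fun d row => d.insert (pvHead0 row) row) PySem.Dict.empty

-- 'for idx, row in enumerate(table_data): if key in lookup and key not in used: replace; used.add(key)'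
def pvReplaceLoop (lookup : PySem.Dict String (List String)) : List (List String) → PySem.Set String → List (List String)
  | [], _ => []
  | r :: rs, used =>
      let key := pvHead0 r
      match lookup.get? key with
      | some sec =>
          if PySem.Set.contains used key then r :: pvReplaceLoop lookup rs used
          else sec :: pvReplaceLoop lookup rs (PySem.Set.add used key)
      | none => r :: pvReplaceLoop lookup rs used

def update_table_data_alt (table_data : List (List String)) (second_key_data : List (List String)) : List (List String) :=
  pvReplaceLoop (pvBuildLookup second_key_data) table_data PySem.Set.empty

-- ===== PRECONDITION & SPEC =====
-- Pre_ excludes inputs containing an empty row: Python A raises IndexError on row[0]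
-- whenever it evaluates an empty row, and on the remaining empty-row inputs (e.g. an
-- empty table row with second_key_data = []) A returns but B raises IndexError.
def Pre_update_table_data (table_data : List (List String)) (second_key_data : List (List String)) : Prop :=
  (∀ r ∈ table_data, r ≠ []) ∧ (∀ r ∈ second_key_data, r ≠ [])
instance (table_data : List (List String)) (second_key_data : List (List String)) : Decidable (Pre_update_table_data table_data second_key_data) := by unfold Pre_update_table_data; infer_instance
def pvWitness_update_table_data : List (List String) × List (List String) :=
  ([["a", "1"], ["b", "2"]], [["b", "9"]])
def Spec_update_table_data (table_data : List (List String)) (second_key_data : List (List String)) (out : List (List String)) : Prop := out = update_table_data_alt table_data second_key_data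
instance (table_data : List (List String)) (second_key_data : List (List String)) (out : List (List String)) : Decidable (Spec_update_table_data table_data second_key_data out) := by unfold Spec_update_table_data; infer_instance

-- ===== CLAIM (what is proved, stated in full; the proofs are below) =====
def Claim_equal_update_table_data : Prop := ∀ (table_data : List (List String)) (second_key_data : List (List String)), Dom_update_table_data table_data second_key_data → Pre_update_table_data table_data second_key_data → Spec_update_table_data table_data second_key_data (update_table_data table_data second_key_data)

-- ===== LEMMAS AND PROOFS =====

-- last row of skd whose first element is k (later rows win, matching repeated replacement by A
-- and dict overwrite in B)
def pvLastLk : List (List String) → String → Option (List String)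
  | [], _ => none
  | s :: rest, k =>
      match pvLastLk rest k with
      | some v => some v
      | none => if pvHead0 s = k then some s else none

-- B's single pass, abstracted over the lookup function and the seen list
def pvRunF (f : String → Option (List String)) : List (List String) → List String → List (List String)
  | [], _ => []
  | r :: rs, seen =>
      let k := pvHead0 r
      match f k with
      | some sec => if k ∈ seen then r :: pvRunF f rs seen else sec :: pvRunF f rs (seen ++ [k])
      | none => r :: pvRunF f rs seen

theorem pvReplaceLoop_eq_runF (d : PySem.Dict String (List String)) :
    ∀ (td : List (List String)) (used : PySem.Set String),
      pvReplaceLoop d td used = pvRunF (fun k => d.get? k) td used := by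
  intro td
  induction td with
  | nil => intro used; rfl
  | cons r rs ih =>
      intro used
      simp only [pvReplaceLoop, pvRunF]
      cases h : d.get? (pvHead0 r) with
      | none => simp [ih]
      | some sec =>
          by_cases hm : pvHead0 r ∈ used
          · simp [PySem.Set.contains, hm, ih]
          · simp [PySem.Set.contains, PySem.Set.add, hm, ih]

theorem pvBuildLookup_get?_aux (k : String) :
    ∀ (skd : List (List String)) (d0 : PySem.Dict String (List String)),
      (skd.foldl (fun d row => d.insert (pvHead0 row) row) d0).get? k =
        (match pvLastLk skd k with
         | some v => some v
         | none => d0.get? k) := by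
  intro skd
  induction skd with
  | nil => intro d0; rfl
  | cons s rest ih =>
      intro d0
      simp only [List.foldl_cons, pvLastLk]
      rw [ih]
      cases pvLastLk rest k with
      | some v => rfl
      | none =>
          simp only
          rw [PySem.Dict.get?_insert]
          by_cases hk : pvHead0 s = k
          · simp [hk]
          · have hk' : ¬ k = pvHead0 s := fun h => hk h.symm
            simp [hk, hk']

theorem pvBuildLookup_get? (skd : List (List String)) (k : String) :
    (pvBuildLookup skd).get? k = pvLastLk skd k := by
  unfold pvBuildLookup
  rw [pvBuildLookup_get?_aux]
  cases pvLastLk skd k <;> simp [PySem.Dict.get?_empty]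

-- f ≡ none passes the table through
theorem pvRunF_none (f : String → Option (List String)) (hf : ∀ k, f k = none) :
    ∀ (td : List (List String)) (seen : List String), pvRunF f td seen = td := by
  intro td
  induction td with
  | nil => intro seen; rfl
  | cons r rs ih => intro seen; simp [pvRunF, hf, ih]

-- changing the lookup only at a key already in seen changes nothing
theorem pvRunF_congr_seen_key (k : String) (f f' : String → Option (List String))
    (hf : ∀ k', k' ≠ k → f' k' = f k') :
    ∀ (td : List (List String)) (seen : List String), k ∈ seen →
      pvRunF f' td seen = pvRunF f td seen := by
  intro td
  induction td with
  | nil => intro seen _; rfl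
  | cons r rs ih =>
      intro seen hk
      simp only [pvRunF]
      by_cases hr : pvHead0 r = k
      · -- blocked in both: with f' the row's key is in seen; with f it is blocked or unmatched
        subst hr
        cases h' : f' (pvHead0 r) with
        | none =>
            cases h : f (pvHead0 r) with
            | none => simp [ih _ hk]
            | some sec => simp [hk, ih _ hk]
        | some sec =>
            cases h : f (pvHead0 r) with
            | none => simp [hk, ih _ hk]
            | some sec' => simp [hk, ih _ hk]
      · rw [hf _ hr]
        cases h : f (pvHead0 r) with
        | none => simp [ih _ hk]
        | some sec =>
            by_cases hm : pvHead0 r ∈ seen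
            · simp [hm, ih _ hk]
            · simp [hm, ih _ (by simp [hk] : k ∈ seen ++ [pvHead0 r])]

-- seen matters only through membership of keys the lookup can match
theorem pvRunF_congr_seen (f : String → Option (List String)) :
    ∀ (td : List (List String)) (s1 s2 : List String),
      (∀ k, f k ≠ none → (k ∈ s1 ↔ k ∈ s2)) →
      pvRunF f td s1 = pvRunF f td s2 := by
  intro td
  induction td with
  | nil => intro _ _ _; rfl
  | cons r rs ih =>
      intro s1 s2 h
      simp only [pvRunF]
      cases hf : f (pvHead0 r) with
      | none => simp [ih _ _ h]
      | some sec =>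
          have hmem : pvHead0 r ∈ s1 ↔ pvHead0 r ∈ s2 := h _ (by simp [hf])
          by_cases hm : pvHead0 r ∈ s1
          · simp [hm, hmem.mp hm, ih _ _ h]
          · have hm2 : pvHead0 r ∉ s2 := fun hx => hm (hmem.mpr hx)
            have h' : ∀ k, f k ≠ none → (k ∈ s1 ++ [pvHead0 r] ↔ k ∈ s2 ++ [pvHead0 r]) := by
              intro k hk; simp [h k hk]
            simp [hm, hm2, ih _ _ h']

-- the key step: one replaceFirst pass absorbed into the lookup
theorem pvStep (s : List String) (rest : List (List String)) :
    ∀ (td : List (List String)) (seen : List String), pvHead0 s ∉ seen →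
      pvRunF (pvLastLk rest) (pvReplaceFirst (pvHead0 s) s td) seen =
        pvRunF (pvLastLk (s :: rest)) td seen := by
  intro td
  induction td with
  | nil => intro seen _; rfl
  | cons r rs ih =>
      intro seen hk
      have hlk : ∀ k', k' ≠ pvHead0 s → pvLastLk (s :: rest) k' = pvLastLk rest k' := by
        intro k' hne
        have hne' : ¬ pvHead0 s = k' := fun h => hne h.symm
        simp only [pvLastLk]
        cases pvLastLk rest k' with
        | some v => rfl
        | none => simp [hne']
      by_cases hr : pvHead0 r = pvHead0 s
      · -- the first matching row: A replaces it with s here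
        simp only [pvReplaceFirst, if_pos hr]
        simp only [pvRunF, hr]
        cases hL : pvLastLk rest (pvHead0 s) with
        | some v =>
            have hL' : pvLastLk (s :: rest) (pvHead0 s) = some v := by
              simp only [pvLastLk, hL]
            rw [hL']
            simp only [if_neg hk]
            exact congrArg (v :: ·)
              (pvRunF_congr_seen_key (pvHead0 s) _ _ hlk rs _ (by simp)).symm
        | none =>
            have hL' : pvLastLk (s :: rest) (pvHead0 s) = some s := by
              simp [pvLastLk, hL]
            rw [hL']
            simp only [if_neg hk]
            refine congrArg (s :: ·) ?_
            rw [pvRunF_congr_seen_key (pvHead0 s) _ _ hlk rs (seen ++ [pvHead0 s]) (by simp)]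
            refine pvRunF_congr_seen (pvLastLk rest) rs seen (seen ++ [pvHead0 s]) ?_
            intro k hkne
            simp only [List.mem_append, List.mem_singleton]
            constructor
            · intro h; exact Or.inl h
            · rintro (h | h)
              · exact h
              · subst h; exact absurd hL hkne
      · simp only [pvReplaceFirst, if_neg hr]
        simp only [pvRunF]
        rw [hlk _ hr]
        cases hL : pvLastLk rest (pvHead0 r) with
        | none => simp [ih _ hk]
        | some sec =>
            by_cases hm : pvHead0 r ∈ seen
            · simp [hm, ih _ hk]
            · have : pvHead0 s ∉ seen ++ [pvHead0 r] := by
                intro h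
                rcases List.mem_append.mp h with h | h
                · exact hk h
                · exact hr (List.mem_singleton.mp h).symm
              simp [hm, ih _ this]

theorem pvMain : ∀ (skd td : List (List String)),
    update_table_data td skd = pvRunF (pvLastLk skd) td [] := by
  intro skd
  induction skd with
  | nil =>
      intro td
      simp only [update_table_data, List.foldl_nil]
      exact (pvRunF_none _ (fun _ => rfl) td []).symm
  | cons s rest ih =>
      intro td
      simp only [update_table_data, List.foldl_cons]
      have := ih (pvReplaceFirst (pvHead0 s) s td)
      simp only [update_table_data] at this
      rw [this]
      exact pvStep s rest td [] (by simp)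

-- ===== VERDICT (by name: the statement is the Claim_ definition above) =====
theorem update_table_data_spec : Claim_equal_update_table_data := by
  intro table_data second_key_data _ _
  unfold Spec_update_table_data update_table_data_alt
  rw [pvReplaceLoop_eq_runF]
  have h : (fun k => (pvBuildLookup second_key_data).get? k) = pvLastLk second_key_data := by
    funext k; exact pvBuildLookup_get? second_key_data k
  rw [h]
  exact pvMain second_key_data table_data
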